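-- pv_equiv track=rewrite | github.com/Bence675/advent-of-code | AoC_2024/7.py | options2
-- ===== SOURCE A (Python) =====
-- def options2(components):
--     if len(components) == 1:
--         return components
--     results = []
--     for comp in options2(components[:-1]):
--         results.append(comp + components[-1])
--         results.append(comp * components[-1])
--         results.append(int(str(comp) + str(components[-1])))
--
--     return results
-- ===== SOURCE B (Python) =====
-- def options2(components):
--     if len(components) == 1:
--         return components
--     results = [components[0]]
--     for comp in components[1:]:
--         new_results = []
--         for r in results:
--             new_results.append(r + comp)
--             new_results.append(r * comp)
--             new_results.append(int(str(r) + str(comp)))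
--         results = new_results
--     return results
-- ===== Notes on version B (the rewrite author's own statement) =====
-- stated objective: simpler
-- what changed: Replaces A's recursion on the list prefix (slicing components[:-1] at every level) with a single left-to-right loop that rebuilds the running result list once per component, removing the recursion and the repeated slicing.
import Mathlib
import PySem

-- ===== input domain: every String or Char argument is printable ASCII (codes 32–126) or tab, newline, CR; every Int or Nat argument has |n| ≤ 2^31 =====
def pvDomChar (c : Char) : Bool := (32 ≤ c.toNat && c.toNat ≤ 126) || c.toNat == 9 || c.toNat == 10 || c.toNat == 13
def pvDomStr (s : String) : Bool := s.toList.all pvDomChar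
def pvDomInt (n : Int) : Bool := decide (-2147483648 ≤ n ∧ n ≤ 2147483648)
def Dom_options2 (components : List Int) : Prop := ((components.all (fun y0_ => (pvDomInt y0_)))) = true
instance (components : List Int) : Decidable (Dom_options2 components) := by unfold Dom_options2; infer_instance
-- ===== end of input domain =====

-- B replaces A's recursion on the prefix (components[:-1]) with one left-to-right loop; objective: simpler.

-- int(str(a) + str(b)): exact for b ≥ 0 (guaranteed by Pre_); Python raises ValueError otherwise (excluded by Pre_)
def pyConcat (a b : Int) : Int :=
  (PySem.Int.ofChars? (PySem.Int.toChars a ++ PySem.Int.toChars b)).getD 0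

-- ===== PORT A =====
-- A: recursion on components[:-1]; on [] Python recurses forever (excluded by Pre_), the ≤ 1 guard only totalises the port there
def options2 (components : List Int) : List Int :=
  if components.length ≤ 1 then components
  else
    let last := PySem.List.pyGetD components (-1) 0
    (options2 (PySem.List.slice components none (some (-1)))).foldl
      (fun results comp => results ++ [comp + last, comp * last, pyConcat comp last]) []
termination_by components.length
decreasing_by
  simp only [PySem.List.slice_to_neg_one]
  rename_i h
  simp only [not_le] at h
  simp [List.length_dropLast]
  omega

-- ===== PORT B =====
-- inner loop of B: rebuild the result list for one component
def stepB (results : List Int) (comp : Int) : List Int :=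
  results.foldl (fun acc r => acc ++ [r + comp, r * comp, pyConcat r comp]) []

-- B: on [] Python raises IndexError (excluded by Pre_); pyGetD's default is never used there under Pre_
def options2_alt (components : List Int) : List Int :=
  if components.length == 1 then components
  else
    (PySem.List.slice components (some 1) none).foldl stepB
      [PySem.List.pyGetD components 0 0]

-- ===== PRECONDITION & SPEC =====
-- Pre_ excludes exactly the inputs where Python A raises: the empty list (RecursionError) and
-- lists with a negative element after the first (ValueError in int(str(r) + str(comp))).
def Pre_options2 (components : List Int) : Prop :=
  components ≠ [] ∧ components.tail.all (fun c => 0 ≤ c) = true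
instance (components : List Int) : Decidable (Pre_options2 components) := by
  unfold Pre_options2; infer_instance

def pvWitness_options2 : List Int := [-2, 3, 4]

def Spec_options2 (components : List Int) (out : List Int) : Prop := out = options2_alt components
instance (components : List Int) (out : List Int) : Decidable (Spec_options2 components out) := by unfold Spec_options2; infer_instance

-- ===== CLAIM (what is proved, stated in full; the proofs are below) =====
def Claim_equal_options2 : Prop := ∀ (components : List Int), Dom_options2 components → Pre_options2 components → Spec_options2 components (options2 components)

-- ===== LEMMAS AND PROOFS =====

-- A's value on a nonempty list is B's left fold over the tail
theorem options2_eq_foldl : ∀ (ys : List Int), ys ≠ [] →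
    options2 ys = ys.tail.foldl stepB [ys.headD 0] := by
  intro ys
  induction ys using List.reverseRecOn with
  | nil => intro h; exact absurd rfl h
  | append_singleton ys y ih =>
    intro _
    by_cases hys : ys = []
    · subst hys
      simp [options2]
    · have hlen : 1 < (ys ++ [y]).length := by
        cases ys with
        | nil => exact absurd rfl hys
        | cons a t => simp
      rw [options2, if_neg (by omega : ¬ (ys ++ [y]).length ≤ 1)]
      rw [PySem.List.slice_to_neg_one, List.dropLast_concat,
          PySem.List.pyGetD_neg_one_append_singleton, ih hys]
      cases ys with
      | nil => exact absurd rfl hys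
      | cons a t =>
        simp only [List.cons_append, List.tail_cons, List.headD_cons, List.foldl_append]
        rfl

-- ===== VERDICT (by name: the statement is the Claim_ definition above) =====
theorem options2_spec : Claim_equal_options2 := by
  intro components _ hpre
  obtain ⟨hne, -⟩ := hpre
  unfold Spec_options2
  cases components with
  | nil => exact absurd rfl hne
  | cons x rest =>
    rw [options2_eq_foldl (x :: rest) (by simp)]
    unfold options2_alt
    rw [PySem.List.slice_from_one]
    by_cases hr : rest = []
    · subst hr; simp
    · have : ¬ ((x :: rest).length == 1) = true := by
        simp; cases rest with | nil => exact absurd rfl hr | cons b t => simp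
      rw [if_neg (by simpa using this)]
      simp [PySem.List.pyGetD_zero_cons]
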